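-- pv_equiv track=rewrite | github.com/vdhugn/8firstweeks.Project1 | Project 1/k_subSequence.py | count_even_weight_subsequences
-- ===== SOURCE A (Python) =====
-- def count_even_weight_subsequences(k, m):
--   table = [[0 for _ in range(k + 1)] for _ in range(m + 1)]
--
--   for i in range(m + 1):
--     table[i][0] = 1
--
--   for i in range(1, m + 1):
--     for j in range(1, k + 1):
--       # If the current element is even, then we can either include it in the subsequence or not.
--       if i % 2 == 0:
--         table[i][j] = table[i - 1][j] + table[i - 1][j - 1]
--       # Otherwise, we can only include the current element in the subsequence if the remaining subsequence has even weight.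
--       else:
--         table[i][j] = table[i - 1][j - 1]
--
--   # Return the number of k-subsequences with even weight for the entire set.
--   return table[m][k]
-- ===== SOURCE B (Python) =====
-- def _comb(n, r):
--     if r < 0 or r > n:
--         return 0
--     if n - r < r:
--         r = n - r
--     c = 1
--     for i in range(1, r + 1):
--         c = c * (n - r + i) // i
--     return c
--
-- def count_even_weight_subsequences(k, m):
--     # closed form: the DP's row m has generating polynomial
--     #   Q_t = (x(1+x))^t + sum_{i<t} (1+x)(x(1+x))^i   for m = 2t,
--     # and row 2t+1 = x*Q_t + 1, so the answer is a short sum of binomials.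
--     t = m // 2
--     if m % 2 != 0:
--         if k == 0:
--             return 1
--         k = k - 1
--     total = _comb(t, k - t)
--     for i in range(k // 2, min(t - 1, k) + 1):
--         total += _comb(i + 1, k - i)
--     return total
-- ===== Notes on version B (the rewrite author's own statement) =====
-- stated objective: faster
-- what changed: A fills an (m+1)x(k+1) DP table cell by cell; B evaluates the closed form of the table row's generating polynomial Q_{m//2} = (x(1+x))^t + sum_{i<t}(1+x)(x(1+x))^i, i.e. a short sum of at most ~k/2+2 binomial coefficients computed multiplicatively, with no table at all.
import Mathlib
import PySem

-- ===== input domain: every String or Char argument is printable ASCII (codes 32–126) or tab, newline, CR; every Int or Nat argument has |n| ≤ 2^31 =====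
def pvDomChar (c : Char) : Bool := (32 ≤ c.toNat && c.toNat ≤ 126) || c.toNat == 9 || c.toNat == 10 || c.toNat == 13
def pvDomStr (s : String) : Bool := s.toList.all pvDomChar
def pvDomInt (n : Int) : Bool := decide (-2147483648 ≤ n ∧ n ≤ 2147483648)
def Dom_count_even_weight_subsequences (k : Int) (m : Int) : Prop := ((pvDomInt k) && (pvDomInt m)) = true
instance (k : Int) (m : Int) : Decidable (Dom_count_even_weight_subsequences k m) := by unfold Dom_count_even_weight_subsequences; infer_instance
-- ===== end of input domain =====

-- B replaces A's O(m*k) DP table by a short closed-form sum of binomial coefficients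
-- read off the table row's generating polynomial (objective: faster).

-- ===== PORT A =====
-- Literal transliteration of A's table DP.  The pyGetD/pySetD defaults (0 / []) are
-- only reached on inputs Pre_ excludes (Python raises IndexError there: k < 0 or m < 0).
def count_even_weight_subsequences (k : Int) (m : Int) : Int :=
  let table : List (List Int) :=
    (PySem.List.pyRange 0 (m + 1)).map (fun _ =>
      (PySem.List.pyRange 0 (k + 1)).map (fun _ => (0 : Int)))
  let table :=
    (PySem.List.pyRange 0 (m + 1)).foldl (fun tb i =>
      PySem.List.pySetD tb i (PySem.List.pySetD (PySem.List.pyGetD tb i []) 0 1)) table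
  let table :=
    (PySem.List.pyRange 1 (m + 1)).foldl (fun tb i =>
      (PySem.List.pyRange 1 (k + 1)).foldl (fun tb j =>
        let v : Int :=
          if PySem.Int.mod i 2 = 0 then
            PySem.List.pyGetD (PySem.List.pyGetD tb (i - 1) []) j 0 +
            PySem.List.pyGetD (PySem.List.pyGetD tb (i - 1) []) (j - 1) 0
          else
            PySem.List.pyGetD (PySem.List.pyGetD tb (i - 1) []) (j - 1) 0
        PySem.List.pySetD tb i (PySem.List.pySetD (PySem.List.pyGetD tb i []) j v)) tb) table
  PySem.List.pyGetD (PySem.List.pyGetD table m []) k 0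

-- ===== PORT B =====
-- helper _comb(n, r) of Source B: multiplicative binomial coefficient, exact division each step
def pvComb (n : Int) (r : Int) : Int :=
  if r < 0 ∨ r > n then 0
  else
    let r := if n - r < r then n - r else r
    (PySem.List.pyRange 1 (r + 1)).foldl
      (fun c i => PySem.Int.floordiv (c * (n - r + i)) i) 1
def count_even_weight_subsequences_alt (k : Int) (m : Int) : Int :=
  let t := PySem.Int.floordiv m 2
  if PySem.Int.mod m 2 ≠ 0 ∧ k = 0 then 1
  else
    let k := if PySem.Int.mod m 2 ≠ 0 then k - 1 else k
    let total := pvComb t (k - t)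
    (PySem.List.pyRange (PySem.Int.floordiv k 2) (min (t - 1) k + 1)).foldl
      (fun total i => total + pvComb (i + 1) (k - i)) total

-- ===== PRECONDITION & SPEC =====
-- Pre_ excludes exactly the inputs on which the Python A raises IndexError (k < 0 or m < 0).
def Pre_count_even_weight_subsequences (k : Int) (m : Int) : Prop := 0 ≤ k ∧ 0 ≤ m
instance (k : Int) (m : Int) : Decidable (Pre_count_even_weight_subsequences k m) := by
  unfold Pre_count_even_weight_subsequences; infer_instance

def pvWitness_count_even_weight_subsequences : Int × Int := (3, 6)

def Spec_count_even_weight_subsequences (k : Int) (m : Int) (out : Int) : Prop := out = count_even_weight_subsequences_alt k m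
instance (k : Int) (m : Int) (out : Int) : Decidable (Spec_count_even_weight_subsequences k m out) := by unfold Spec_count_even_weight_subsequences; infer_instance

-- ===== CLAIM (what is proved, stated in full; the proofs are below) =====
def Claim_equal_count_even_weight_subsequences : Prop := ∀ (k : Int) (m : Int), Dom_count_even_weight_subsequences k m → Pre_count_even_weight_subsequences k m → Spec_count_even_weight_subsequences k m (count_even_weight_subsequences k m)

-- ===== LEMMAS AND PROOFS =====

-- A's DP recurrence, as a function: Tt i j = table[i][j].
def Cz (n r : Int) : Int := if 0 ≤ r ∧ r ≤ n then (Nat.choose n.toNat r.toNat : Int) else 0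

lemma Cz_neg (n r : Int) (h : r < 0) : Cz n r = 0 := by
  unfold Cz; rw [if_neg]; omega

lemma Cz_pascal (n : Nat) (r : Int) : Cz (n + 1 : Nat) r = Cz n r + Cz n (r - 1) := by
  unfold Cz
  split_ifs with c1 c2 c3 c3' c2' c3'' c3'''
  · have hr1 : 1 ≤ r := by omega
    have hs : r.toNat = (r - 1).toNat + 1 := by omega
    rw [hs]
    simp only [Int.toNat_natCast]
    rw [Nat.choose_succ_succ']
    push_cast; ring
  · have hr0 : r = 0 := by omega
    subst hr0; simp
  · have hrn : r = (n : Int) + 1 := by omega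
    subst hrn
    have h1 : ((n:Int) + 1).toNat = n + 1 := by omega
    have h2 : ((n:Int) + 1 - 1).toNat = n := by omega
    rw [h1, h2]
    simp [Nat.choose_self]
  · exfalso; omega
  · exfalso; omega
  · exfalso; omega
  · exfalso; omega
  · ring

lemma Cz_one (r : Int) : Cz 1 r = if r = 0 ∨ r = 1 then 1 else 0 := by
  unfold Cz
  by_cases h0 : r = 0
  · subst h0; norm_num
  · by_cases h1 : r = 1
    · subst h1; norm_num
    · rw [if_neg (by omega), if_neg (by tauto)]

def Gf (t : Nat) (K : Int) : Int :=
  Cz t (K - t) + ((List.range t).map (fun i => Cz (i + 1 : Nat) (K - i))).sum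

lemma Gf_neg (t : Nat) (K : Int) (h : K < 0) : Gf t K = 0 := by
  unfold Gf
  rw [Cz_neg _ _ (by omega)]
  have : ∀ x ∈ (List.range t).map (fun i => Cz (i + 1 : Nat) (K - i)), x = 0 := by
    intro x hx
    simp only [List.mem_map, List.mem_range] at hx
    obtain ⟨i, _, rfl⟩ := hx
    exact Cz_neg _ _ (by omega)
  rw [List.sum_eq_zero this]; ring

lemma Gf_rec (t : Nat) (K : Int) :
    Gf (t + 1) K = Gf t (K - 1) + Gf t (K - 2) + (if K = 0 ∨ K = 1 then 1 else 0) := by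
  unfold Gf
  rw [List.range_succ_eq_map, List.map_cons, List.sum_cons, List.map_map]
  have hmap : (List.range t).map ((fun i => Cz (i + 1 : Nat) (K - i)) ∘ Nat.succ)
      = (List.range t).map (fun i => Cz (i + 1 : Nat) ((K - 1) - i) + Cz (i + 1 : Nat) ((K - 2) - i)) := by
    apply List.map_congr_left
    intro i _
    simp only [Function.comp]
    have h1 : (Nat.succ i + 1 : Nat) = ((i + 1) + 1 : Nat) := by omega
    rw [h1, Cz_pascal (i + 1)]
    have h2 : K - (Nat.succ i : Nat) = (K - 1) - i := by push_cast; ring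
    have h3 : K - (Nat.succ i : Nat) - 1 = (K - 2) - i := by push_cast; ring
    rw [h2]
    have h4 : K - 1 - (i:Int) - 1 = (K - 2) - i := by ring
    rw [h4]
  rw [hmap, PySem.List.sum_map_add_int]
  have hc : Cz (t + 1 : Nat) (K - (t + 1 : Nat)) = Cz t ((K - 1) - t) + Cz t ((K - 2) - t) := by
    rw [Cz_pascal t]
    congr 1 <;> [skip; congr 1] <;> push_cast <;> ring
  rw [hc]
  have hhead : Cz ((0 + 1 : Nat) : Int) (K - (0 : Nat)) = if K = 0 ∨ K = 1 then 1 else 0 := by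
    have : ((0 + 1 : Nat) : Int) = 1 := by norm_num
    rw [this]
    have : K - ((0 : Nat) : Int) = K := by push_cast; ring
    rw [this, Cz_one]
  rw [hhead]
  ring

def Tt : Nat → Nat → Int
  | _, 0 => 1
  | 0, _ + 1 => 0
  | i + 1, j + 1 => if (i + 1) % 2 = 0 then Tt i (j + 1) + Tt i j else Tt i j

lemma Tt_zero_right (i : Nat) : Tt i 0 = 1 := by cases i <;> rfl

lemma Gf_zero (K : Int) : Gf 0 K = if K = 0 then 1 else 0 := by
  unfold Gf Cz
  simp only [List.range_zero, List.map_nil, List.sum_nil, Nat.cast_zero, sub_zero, add_zero]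
  split_ifs with h1 h2 h2
  · simp [h2]
  · omega
  · omega
  · rfl

lemma Tt_closed (t : Nat) :
    (∀ K : Nat, Tt (2 * t) K = Gf t K) ∧
    (∀ K : Nat, Tt (2 * t + 1) K = if K = 0 then 1 else Gf t ((K : Int) - 1)) := by
  induction t with
  | zero =>
    constructor
    · intro K
      cases K with
      | zero => rw [Tt_zero_right, Gf_zero]; norm_num
      | succ j =>
        rw [show (2 * 0 : Nat) = 0 from rfl, show Tt 0 (j + 1) = 0 from rfl, Gf_zero,
          if_neg (by push_cast; omega)]
    · intro K
      cases K with
      | zero => rw [Tt_zero_right, if_pos rfl]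
      | succ j =>
        rw [if_neg (by omega)]
        rw [show (2 * 0 + 1 : Nat) = 0 + 1 from rfl]
        show (if (0 + 1) % 2 = 0 then Tt 0 (j + 1) + Tt 0 j else Tt 0 j) = _
        rw [if_neg (by omega), Gf_zero]
        cases j with
        | zero => rw [Tt_zero_right]; norm_num
        | succ j' =>
          rw [show Tt 0 (j' + 1) = 0 from rfl, if_neg (by push_cast; omega)]
  | succ t ih =>
    have hE : ∀ K : Nat, Tt (2 * (t + 1)) K = Gf (t + 1) K := by
      intro K
      cases K with
      | zero =>
        rw [Tt_zero_right, Gf_rec, Gf_neg _ _ (by omega), Gf_neg _ _ (by omega)]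
        norm_num
      | succ j =>
        rw [show (2 * (t + 1) : Nat) = (2 * t + 1) + 1 by ring]
        show (if ((2 * t + 1) + 1) % 2 = 0 then Tt (2 * t + 1) (j + 1) + Tt (2 * t + 1) j
              else Tt (2 * t + 1) j) = _
        rw [if_pos (by omega), ih.2 (j + 1), ih.2 j, if_neg (by omega)]
        rw [show ((j + 1 : Nat) : Int) - 1 = (j : Int) by push_cast; ring]
        rw [Gf_rec]
        rw [show ((j + 1 : Nat) : Int) - 1 = (j : Int) by push_cast; ring,
          show ((j + 1 : Nat) : Int) - 2 = (j : Int) - 1 by push_cast; ring]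
        cases j with
        | zero =>
          rw [if_pos rfl, if_pos (by push_cast; norm_num)]
          have h6 : Gf t (((0 : Nat) : Int) - 1) = 0 := Gf_neg _ _ (by norm_num)
          rw [h6]; ring
        | succ j' =>
          rw [if_neg (by omega), if_neg (by push_cast; omega)]
          ring
    refine ⟨hE, ?_⟩
    intro K
    cases K with
    | zero => rw [Tt_zero_right, if_pos rfl]
    | succ j =>
      rw [show (2 * (t + 1) + 1 : Nat) = (2 * (t + 1)) + 1 by ring]
      show (if ((2 * (t + 1)) + 1) % 2 = 0 then Tt (2 * (t + 1)) (j + 1) + Tt (2 * (t + 1)) j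
            else Tt (2 * (t + 1)) j) = _
      rw [if_neg (by omega), hE j, if_neg (by omega),
        show ((j + 1 : Nat) : Int) - 1 = (j : Int) by push_cast; ring]

-- ---- B-side: the port computes the closed form Gf ----
lemma Cz_gt (n r : Int) (h : n < r) : Cz n r = 0 := by
  unfold Cz; rw [if_neg]; omega

lemma combLoop (N R : Nat) (hR : R ≤ N) : ∀ q, q ≤ R →
    (PySem.List.pyRange 1 ((q : Int) + 1)).foldl
      (fun c i => PySem.Int.floordiv (c * ((N : Int) - (R : Int) + i)) i) 1
    = (Nat.choose (N - R + q) q : Int) := by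
  intro q
  induction q with
  | zero =>
    intro _
    norm_num [PySem.List.pyRange]
  | succ q ihq =>
    intro hq
    have h1 : PySem.List.pyRange 1 ((↑(q + 1) : Int) + 1)
        = PySem.List.pyRange 1 ((q : Int) + 1) ++ [(q : Int) + 1] := by
      have := PySem.List.pyRange_one_succ_right (a := 1) (b := (q : Int) + 1) (by omega)
      push_cast
      rw [this]
    rw [h1, List.foldl_append, ihq (by omega)]
    simp only [List.foldl]
    have hcast : (N : Int) - (R : Int) + ((q : Int) + 1) = ((N - R + q + 1 : Nat) : Int) := by
      push_cast; omega
    rw [hcast]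
    have hnat : Nat.choose (N - R + q) q * (N - R + q + 1)
        = Nat.choose (N - R + q + 1) (q + 1) * (q + 1) := by
      rw [Nat.mul_comm]
      exact Nat.succ_mul_choose_eq (N - R + q) q
    have hmul : (Nat.choose (N - R + q) q : Int) * ((N - R + q + 1 : Nat) : Int)
        = (Nat.choose (N - R + q + 1) (q + 1) : Int) * ((q : Int) + 1) := by
      exact_mod_cast hnat
    rw [hmul, PySem.Int.floordiv_eq_ediv_of_pos (by omega), Int.mul_ediv_cancel _ (by omega)]
    have hq1 : N - R + q + 1 = N - R + (q + 1) := by omega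
    rw [hq1]

lemma pvComb_eq_Cz (n r : Int) (hn : 0 ≤ n) : pvComb n r = Cz n r := by
  unfold pvComb
  by_cases h : r < 0 ∨ r > n
  · rw [if_pos h]
    rcases h with h | h
    · rw [Cz_neg _ _ h]
    · rw [Cz_gt _ _ h]
  · rw [if_neg h]
    push_neg at h
    obtain ⟨h0, h1⟩ := h
    by_cases hs : n - r < r
    · simp only [if_pos hs]
      have key := combLoop n.toNat (n - r).toNat (by omega) (n - r).toNat (le_refl _)
      rw [show ((n.toNat : Nat) : Int) = n from by omega] at key
      rw [show n - r = (((n - r).toNat : Nat) : Int) from by omega]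
      rw [key]
      unfold Cz
      rw [if_pos ⟨h0, h1⟩]
      have he : n.toNat - (n - r).toNat + (n - r).toNat = n.toNat := by omega
      rw [he]
      have hsym : Nat.choose n.toNat (n - r).toNat = Nat.choose n.toNat r.toNat := by
        have h2 : (n - r).toNat = n.toNat - r.toNat := by omega
        rw [h2]
        exact Nat.choose_symm (by omega)
      rw [hsym]
    · simp only [if_neg hs]
      have key := combLoop n.toNat r.toNat (by omega) r.toNat (le_refl _)
      rw [show ((n.toNat : Nat) : Int) = n from by omega] at key
      rw [show r = ((r.toNat : Nat) : Int) from by omega]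
      rw [key]
      unfold Cz
      rw [if_pos (by constructor <;> omega)]
      have he : n.toNat - r.toNat + r.toNat = n.toNat := by omega
      rw [he]
      congr 2
lemma sumRange (t : Nat) (k' : Int) (hk : 0 ≤ k') :
    ((PySem.List.pyRange (PySem.Int.floordiv k' 2) (min ((t : Int) - 1) k' + 1)).map
      (fun i => Cz (i + 1) (k' - i))).sum
    = ((List.range t).map (fun i => Cz ((i + 1 : Nat) : Int) (k' - i))).sum := by
  have hlo : PySem.Int.floordiv k' 2 = k' / 2 := PySem.Int.floordiv_eq_ediv_of_pos (by norm_num)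
  rw [hlo]
  have hz1 : ∀ i : Int, 0 ≤ i → i < k' / 2 → Cz (i + 1) (k' - i) = 0 := by
    intro i h0 h1
    exact Cz_gt _ _ (by omega)
  have hz2 : ∀ i : Int, min ((t : Int) - 1) k' + 1 ≤ i → i < (t : Int) → Cz (i + 1) (k' - i) = 0 := by
    intro i h0 h1
    exact Cz_neg _ _ (by omega)
  have hRHS : ((List.range t).map (fun i => Cz ((i + 1 : Nat) : Int) (k' - i))).sum
      = ((PySem.List.pyRange 0 (t : Int)).map (fun i => Cz (i + 1) (k' - i))).sum := by
    rw [PySem.List.pyRange_zero_natCast, List.map_map]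
    congr 1
  rw [hRHS]

  by_cases hc : min ((t : Int) - 1) k' + 1 ≤ k' / 2
  · have hnil : PySem.List.pyRange (k' / 2) (min ((t : Int) - 1) k' + 1) = [] := by
      apply List.eq_nil_iff_forall_not_mem.mpr
      intro x hx
      rw [PySem.List.mem_pyRange_one] at hx
      omega
    rw [hnil]
    simp only [List.map_nil, List.sum_nil]
    symm
    apply List.sum_eq_zero
    intro x hx
    simp only [List.mem_map] at hx
    obtain ⟨i, hi, rfl⟩ := hx
    rw [PySem.List.mem_pyRange_one] at hi
    by_cases hil : i < k' / 2
    · exact hz1 i (by omega) hil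
    · exact hz2 i (by omega) (by omega)
  · push_neg at hc
    have hsplit : PySem.List.pyRange 0 (t : Int)
        = PySem.List.pyRange 0 (k' / 2) ++ PySem.List.pyRange (k' / 2) (min ((t : Int) - 1) k' + 1)
          ++ PySem.List.pyRange (min ((t : Int) - 1) k' + 1) (t : Int) := by
      rw [PySem.List.pyRange_one_append 0 (min ((t : Int) - 1) k' + 1) (t : Int) (by omega) (by omega),
        PySem.List.pyRange_one_append 0 (k' / 2) (min ((t : Int) - 1) k' + 1) (by omega) (by omega)]
    rw [hsplit, List.map_append, List.map_append, List.sum_append, List.sum_append]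
    have hs1 : ((PySem.List.pyRange 0 (k' / 2)).map (fun i => Cz (i + 1) (k' - i))).sum = 0 := by
      apply List.sum_eq_zero
      intro x hx
      simp only [List.mem_map] at hx
      obtain ⟨i, hi, rfl⟩ := hx
      rw [PySem.List.mem_pyRange_one] at hi
      exact hz1 i (by omega) (by omega)
    have hs3 : ((PySem.List.pyRange (min ((t : Int) - 1) k' + 1) (t : Int)).map (fun i => Cz (i + 1) (k' - i))).sum = 0 := by
      apply List.sum_eq_zero
      intro x hx
      simp only [List.mem_map] at hx
      obtain ⟨i, hi, rfl⟩ := hx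
      rw [PySem.List.mem_pyRange_one] at hi
      exact hz2 i (by omega) (by omega)
    rw [hs1, hs3]
    ring

lemma portB_eq (K M : Nat) :
    count_even_weight_subsequences_alt (K : Int) (M : Int) =
      if M % 2 ≠ 0 ∧ K = 0 then 1
      else Gf (M / 2) (if M % 2 ≠ 0 then (K : Int) - 1 else (K : Int)) := by
  unfold count_even_weight_subsequences_alt
  have hdiv : PySem.Int.floordiv (M : Int) 2 = ((M / 2 : Nat) : Int) := by
    exact_mod_cast PySem.Int.floordiv_natCast M 2
  have hmod : PySem.Int.mod (M : Int) 2 = ((M % 2 : Nat) : Int) := by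
    exact_mod_cast PySem.Int.mod_natCast M 2
  simp only [hdiv, hmod]
  by_cases hcond : ((M % 2 : Nat) : Int) ≠ 0 ∧ (K : Int) = 0
  · rw [if_pos hcond, if_pos (by constructor <;> omega)]
  · have hnN : ¬(M % 2 ≠ 0 ∧ K = 0) := by
      intro h
      obtain ⟨h1, h2⟩ := h
      exact hcond ⟨by omega, by omega⟩
    rw [if_neg hcond, if_neg hnN]
    have hk' : (if ((M % 2 : Nat) : Int) ≠ 0 then (K : Int) - 1 else (K : Int))
        = (if M % 2 ≠ 0 then (K : Int) - 1 else (K : Int)) := by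
      by_cases h : M % 2 = 0
      · rw [if_neg (by omega), if_neg (by omega)]
      · rw [if_pos (by omega), if_pos h]
    rw [hk']
    set k' : Int := if M % 2 ≠ 0 then (K : Int) - 1 else (K : Int) with hk'def
    have hk0 : 0 ≤ k' := by
      rw [hk'def]
      by_cases h : M % 2 = 0
      · rw [if_neg (by omega)]; positivity
      · rw [if_pos h]
        have hK : (K : Int) ≠ 0 := by
          intro hK0
          exact hcond ⟨by omega, hK0⟩
        omega
    rw [PySem.List.foldl_add]
    have hmapc : (PySem.List.pyRange (PySem.Int.floordiv k' 2) (min (((M / 2 : Nat) : Int) - 1) k' + 1)).map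
          (fun i => pvComb (i + 1) (k' - i))
        = (PySem.List.pyRange (PySem.Int.floordiv k' 2) (min (((M / 2 : Nat) : Int) - 1) k' + 1)).map
          (fun i => Cz (i + 1) (k' - i)) := by
      apply List.map_congr_left
      intro i hi
      rw [PySem.List.mem_pyRange_one] at hi
      apply pvComb_eq_Cz
      have hlo : PySem.Int.floordiv k' 2 = k' / 2 := PySem.Int.floordiv_eq_ediv_of_pos (by norm_num)
      omega
    rw [hmapc, sumRange (M / 2) k' hk0, pvComb_eq_Cz _ _ (by positivity)]
    unfold Gf
    ring

-- ---- A-side: the nested table folds compute Tt ----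
def rowT (K p : Nat) : List Int := (List.range (K + 1)).map (fun j => Tt p j)

-- set on a map-over-range list
lemma set_map_range {α : Type} (L : Nat) (f : Nat → α) (n : Nat) (v : α) :
    ((List.range L).map f).set n v
      = (List.range L).map (fun p => if p = n then v else f p) := by
  apply List.ext_getElem
  · simp
  · intro i h1 h2
    simp only [List.getElem_set, List.getElem_map, List.getElem_range]
    by_cases h : n = i
    · subst h; simp
    · rw [if_neg h, if_neg (by omega)]

lemma pyRange_one_natCast (n : Nat) :
    PySem.List.pyRange 1 ((n : Int) + 1) = (List.range n).map (fun i => ((i + 1 : Nat) : Int)) := by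
  induction n with
  | zero => norm_num [PySem.List.pyRange]
  | succ n ih =>
    have h1 : ((n + 1 : Nat) : Int) + 1 = ((n : Int) + 1) + 1 := by push_cast; ring
    rw [h1, PySem.List.pyRange_one_succ_right (by omega), ih, List.range_succ, List.map_append]
    norm_num

-- stage 1: setting column 0 of every row
lemma stage1 (M K : Nat) :
    ((List.range (M + 1)).map (fun i : Nat => (i : Int))).foldl
      (fun tb i => PySem.List.pySetD tb i (PySem.List.pySetD (PySem.List.pyGetD tb i []) 0 1))
      (List.replicate (M + 1) (List.replicate (K + 1) (0 : Int)))
    = (List.range (M + 1)).map (fun _ => rowT K 0) := by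
  have key : ∀ n, n ≤ M + 1 →
      ((List.range n).map (fun i : Nat => (i : Int))).foldl
        (fun tb i => PySem.List.pySetD tb i (PySem.List.pySetD (PySem.List.pyGetD tb i []) 0 1))
        (List.replicate (M + 1) (List.replicate (K + 1) (0 : Int)))
      = (List.range (M + 1)).map (fun p => if p < n then rowT K 0 else List.replicate (K + 1) 0) := by
    intro n
    induction n with
    | zero =>
      intro _
      simp only [List.range_zero, List.map_nil, List.foldl_nil]
      apply List.ext_getElem
      · simp
      · intro i h1 h2
        simp only [List.getElem_replicate, List.getElem_map, List.getElem_range]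
        rw [if_neg (by omega)]
    | succ n ih =>
      intro hn
      rw [List.range_succ, List.map_append, List.foldl_append, ih (by omega)]
      simp only [List.map_cons, List.map_nil, List.foldl_cons, List.foldl_nil]
      rw [PySem.List.pyGetD_natCast, PySem.List.getD_map_range _ _ _ _ (by omega),
        if_neg (by omega), PySem.List.pySetD_natCast, set_map_range]
      have hrow : PySem.List.pySetD (List.replicate (K + 1) (0 : Int)) 0 1 = rowT K 0 := by
        rw [show (0 : Int) = ((0 : Nat) : Int) from rfl, PySem.List.pySetD_natCast]
        apply List.ext_getElem
        · simp [rowT]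
        · intro i h1 h2
          simp only [List.getElem_set, List.getElem_replicate, rowT, List.getElem_map,
            List.getElem_range]
          by_cases h : i = 0
          · subst h; simp [Tt_zero_right]
          · rw [if_neg (by omega)]
            cases i with
            | zero => omega
            | succ i' => rfl
      rw [hrow]
      apply List.map_congr_left
      intro p _
      by_cases h : p = n
      · subst h; simp
      · rw [if_neg h]
        by_cases h2 : p < n
        · rw [if_pos h2, if_pos (by omega)]
        · rw [if_neg h2, if_neg (by omega)]
  have := key (M + 1) (le_refl _)
  rw [this]
  apply List.map_congr_left
  intro p hp
  rw [List.mem_range] at hp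
  rw [if_pos hp]
def stateN (M K n : Nat) : List (List Int) :=
  (List.range (M + 1)).map (fun p => if p ≤ n then rowT K p else rowT K 0)

def rowI (K i q : Nat) : List Int :=
  (List.range (K + 1)).map (fun j => if j ≤ q then Tt i j else if j = 0 then 1 else 0)

def stateI (M K n q : Nat) : List (List Int) :=
  (List.range (M + 1)).map
    (fun p => if p = n + 1 then rowI K (n + 1) q else if p ≤ n then rowT K p else rowT K 0)

lemma stateI_zero (M K n : Nat) : stateI M K n 0 = stateN M K n := by
  unfold stateI stateN
  apply List.map_congr_left
  intro p _
  by_cases h : p = n + 1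
  · subst h
    rw [if_pos rfl, if_neg (by omega)]
    unfold rowI rowT
    apply List.map_congr_left
    intro j _
    by_cases hj : j = 0
    · subst hj; rw [if_pos (by omega), Tt_zero_right, Tt_zero_right]
    · rw [if_neg (by omega), if_neg hj]
      cases j with
      | zero => omega
      | succ j' => rfl
  · rw [if_neg h]

lemma innerKey (M K n : Nat) (hn : n < M) : ∀ q, q ≤ K →
    ((List.range q).map (fun j : Nat => ((j + 1 : Nat) : Int))).foldl
      (fun tb j =>
        let v : Int :=
          if PySem.Int.mod ((n + 1 : Nat) : Int) 2 = 0 then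
            PySem.List.pyGetD (PySem.List.pyGetD tb (((n + 1 : Nat) : Int) - 1) []) j 0 +
            PySem.List.pyGetD (PySem.List.pyGetD tb (((n + 1 : Nat) : Int) - 1) []) (j - 1) 0
          else
            PySem.List.pyGetD (PySem.List.pyGetD tb (((n + 1 : Nat) : Int) - 1) []) (j - 1) 0
        PySem.List.pySetD tb ((n + 1 : Nat) : Int)
          (PySem.List.pySetD (PySem.List.pyGetD tb ((n + 1 : Nat) : Int) []) j v))
      (stateI M K n 0)
    = stateI M K n q := by
  intro q
  induction q with
  | zero => intro _; simp
  | succ q ihq =>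
    intro hq
    rw [List.range_succ, List.map_append, List.foldl_append, ihq (by omega)]
    simp only [List.map_cons, List.map_nil, List.foldl_cons, List.foldl_nil]
    have hsub : ((n + 1 : Nat) : Int) - 1 = ((n : Nat) : Int) := by push_cast; ring
    have hsubj : ((q + 1 + 1 : Nat) : Int) - 1 = ((q + 1 : Nat) : Int) := by push_cast; ring
    rw [hsub]
    -- row n of stateI is rowT K n
    have hprev : PySem.List.pyGetD (stateI M K n q) ((n : Nat) : Int) [] = rowT K n := by
      unfold stateI
      rw [PySem.List.pyGetD_natCast, PySem.List.getD_map_range _ _ _ _ (by omega),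
        if_neg (by omega), if_pos (by omega)]
    have hcur : PySem.List.pyGetD (stateI M K n q) ((n + 1 : Nat) : Int) [] = rowI K (n + 1) q := by
      unfold stateI
      rw [PySem.List.pyGetD_natCast, PySem.List.getD_map_range _ _ _ _ (by omega), if_pos rfl]
    -- wait: the j in the fold is ↑(q+1); pyGetD prev j and (j-1)
    rw [hprev, hcur]
    have hg1 : PySem.List.pyGetD (rowT K n) ((q + 1 : Nat) : Int) 0 = Tt n (q + 1) := by
      unfold rowT
      rw [PySem.List.pyGetD_natCast, PySem.List.getD_map_range _ _ _ _ (by omega)]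
    have hg0 : PySem.List.pyGetD (rowT K n) (((q + 1 : Nat) : Int) - 1) 0 = Tt n q := by
      unfold rowT
      rw [show ((q + 1 : Nat) : Int) - 1 = ((q : Nat) : Int) from by push_cast; ring,
        PySem.List.pyGetD_natCast, PySem.List.getD_map_range _ _ _ _ (by omega)]
    rw [hg1, hg0]
    have hmod : PySem.Int.mod ((n + 1 : Nat) : Int) 2 = (((n + 1) % 2 : Nat) : Int) := by
      exact_mod_cast PySem.Int.mod_natCast (n + 1) 2
    rw [hmod]
    have hv : (if (((n + 1) % 2 : Nat) : Int) = 0 then Tt n (q + 1) + Tt n q else Tt n q)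
        = Tt (n + 1) (q + 1) := by
      have hTt : Tt (n + 1) (q + 1) = if (n + 1) % 2 = 0 then Tt n (q + 1) + Tt n q else Tt n q := by
        simp [Tt]
      rw [hTt]
      by_cases h : (n + 1) % 2 = 0
      · rw [if_pos (by omega), if_pos h]
      · rw [if_neg (by omega), if_neg h]
    rw [hv]
    -- update the row, then the table
    have hrow : PySem.List.pySetD (rowI K (n + 1) q) ((q + 1 : Nat) : Int) (Tt (n + 1) (q + 1))
        = rowI K (n + 1) (q + 1) := by
      unfold rowI
      rw [PySem.List.pySetD_natCast, set_map_range]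
      apply List.map_congr_left
      intro j hj
      rw [List.mem_range] at hj
      by_cases h : j = q + 1
      · subst h; rw [if_pos rfl, if_pos (by omega)]
      · rw [if_neg h]
        by_cases h2 : j ≤ q
        · rw [if_pos h2, if_pos (by omega)]
        · rw [if_neg h2, if_neg (show ¬ j ≤ q + 1 by omega)]
    rw [hrow]
    unfold stateI
    rw [PySem.List.pySetD_natCast, set_map_range]
    apply List.map_congr_left
    intro p hp
    rw [List.mem_range] at hp
    by_cases h : p = n + 1
    · subst h; rw [if_pos rfl, if_pos rfl]
    · rw [if_neg h, if_neg h, if_neg h]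

lemma stateI_last (M K n : Nat) : stateI M K n K = stateN M K (n + 1) := by
  unfold stateI stateN
  apply List.map_congr_left
  intro p hp
  by_cases h : p = n + 1
  · subst h
    rw [if_pos rfl, if_pos (by omega)]
    unfold rowI rowT
    apply List.map_congr_left
    intro j hj
    rw [List.mem_range] at hj
    rw [if_pos (by omega)]
  · rw [if_neg h]
    by_cases h2 : p ≤ n
    · rw [if_pos h2, if_pos (by omega)]
    · rw [if_neg h2, if_neg (by omega)]

lemma outerKey (M K : Nat) : ∀ n, n ≤ M →
    ((List.range n).map (fun i : Nat => ((i + 1 : Nat) : Int))).foldl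
      (fun tb i =>
        (PySem.List.pyRange 1 ((K : Int) + 1)).foldl (fun tb j =>
          let v : Int :=
            if PySem.Int.mod i 2 = 0 then
              PySem.List.pyGetD (PySem.List.pyGetD tb (i - 1) []) j 0 +
              PySem.List.pyGetD (PySem.List.pyGetD tb (i - 1) []) (j - 1) 0
            else
              PySem.List.pyGetD (PySem.List.pyGetD tb (i - 1) []) (j - 1) 0
          PySem.List.pySetD tb i (PySem.List.pySetD (PySem.List.pyGetD tb i []) j v)) tb)
      (stateN M K 0)
    = stateN M K n := by
  intro n
  induction n with
  | zero => intro _; simp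
  | succ n ih =>
    intro hn
    rw [List.range_succ, List.map_append, List.foldl_append, ih (by omega)]
    simp only [List.map_cons, List.map_nil, List.foldl_cons, List.foldl_nil]
    rw [pyRange_one_natCast, ← stateI_zero M K n]
    rw [innerKey M K n (by omega) K (le_refl _)]
    exact stateI_last M K n

lemma portA_eq_Tt (K M : Nat) :
    count_even_weight_subsequences (K : Int) (M : Int) = Tt M K := by
  unfold count_even_weight_subsequences
  have hM1 : (M : Int) + 1 = ((M + 1 : Nat) : Int) := by push_cast; ring
  have hK1 : (K : Int) + 1 = ((K + 1 : Nat) : Int) := by push_cast; ring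
  rw [hM1, hK1, PySem.List.pyRange_zero_natCast, PySem.List.pyRange_zero_natCast]
  simp only [List.map_const', List.length_map, List.length_range]
  rw [stage1 M K]
  have hstate0 : (List.range (M + 1)).map (fun _ => rowT K 0) = stateN M K 0 := by
    unfold stateN
    apply List.map_congr_left
    intro p _
    by_cases h : p ≤ 0
    · have : p = 0 := by omega
      subst this
      rw [if_pos h]
    · rw [if_neg h]
  rw [hstate0]
  rw [show ((M + 1 : Nat) : Int) = (M : Int) + 1 from by push_cast; ring,
    show ((K + 1 : Nat) : Int) = (K : Int) + 1 from by push_cast; ring,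
    pyRange_one_natCast M]
  rw [outerKey M K M (le_refl _)]
  unfold stateN
  rw [PySem.List.pyGetD_natCast, PySem.List.pyGetD_natCast,
    PySem.List.getD_map_range _ _ _ _ (by omega), if_pos (le_refl _)]
  unfold rowT
  rw [PySem.List.getD_map_range _ _ _ _ (by omega)]
lemma mainEq (K M : Nat) :
    count_even_weight_subsequences (K : Int) (M : Int)
      = count_even_weight_subsequences_alt (K : Int) (M : Int) := by
  rw [portA_eq_Tt, portB_eq]
  by_cases h : M % 2 = 0
  · rw [if_neg (by intro hc; exact hc.1 h), if_neg (by omega)]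
    have h1 := (Tt_closed (M / 2)).1 K
    rw [show 2 * (M / 2) = M from by omega] at h1
    exact h1
  · have h2 := (Tt_closed (M / 2)).2 K
    rw [show 2 * (M / 2) + 1 = M from by omega] at h2
    by_cases hK : K = 0
    · rw [if_pos ⟨h, hK⟩, h2, if_pos hK]
    · rw [if_neg (by intro hc; exact hK hc.2), if_pos h, h2, if_neg hK]

-- ===== VERDICT (by name: the statement is the Claim_ definition above) =====
theorem count_even_weight_subsequences_spec : Claim_equal_count_even_weight_subsequences := by
  intro k m _ hpre
  obtain ⟨hk, hm⟩ := hpre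
  unfold Spec_count_even_weight_subsequences
  obtain ⟨K, rfl⟩ := Int.eq_ofNat_of_zero_le hk
  obtain ⟨M, rfl⟩ := Int.eq_ofNat_of_zero_le hm
  exact mainEq K M
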